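-- pv_equiv track=rewrite | github.com/mf-andres/function_analyzer | function_analyzer/infrastracture/subexpression_finder/subexpression_finder.py | find_parentheses_pairs
-- ===== SOURCE A (Python) =====
-- def find_parentheses_pairs(expression_string):
--     opening_parentheses = list()
--     closing_parentheses = list()
--     parenthesis_yet_to_be_close = 0
--     for character_position, character in enumerate(expression_string):
--         if character == "(":
--             parenthesis_yet_to_be_close += 1
--             if parenthesis_yet_to_be_close == 1:
--                 opening_parentheses.append(character_position)
--         if character == ")":
--             parenthesis_yet_to_be_close -= 1
--             if parenthesis_yet_to_be_close == 0:
--                 closing_parentheses.append(character_position)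
--     return opening_parentheses, closing_parentheses
-- ===== SOURCE B (Python) =====
-- def find_parentheses_pairs(expression_string):
--     depths = []
--     depth = 0
--     for character in expression_string:
--         if character == "(":
--             depth += 1
--         elif character == ")":
--             depth -= 1
--         depths.append(depth)
--     opening_parentheses = [i for i, (c, d) in enumerate(zip(expression_string, depths))
--                            if c == "(" and d == 1]
--     closing_parentheses = [i for i, (c, d) in enumerate(zip(expression_string, depths))
--                            if c == ")" and d == 0]
--     return opening_parentheses, closing_parentheses
-- ===== Notes on version B (the rewrite author's own statement) =====
-- stated objective: alternative
-- what changed: Replaces the single interleaved counter scan (which appends to both result lists while updating the balance) with a table-building pass that records the post-update depth for every character, followed by two independent filter passes over the (char, depth) table.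
import Mathlib
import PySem

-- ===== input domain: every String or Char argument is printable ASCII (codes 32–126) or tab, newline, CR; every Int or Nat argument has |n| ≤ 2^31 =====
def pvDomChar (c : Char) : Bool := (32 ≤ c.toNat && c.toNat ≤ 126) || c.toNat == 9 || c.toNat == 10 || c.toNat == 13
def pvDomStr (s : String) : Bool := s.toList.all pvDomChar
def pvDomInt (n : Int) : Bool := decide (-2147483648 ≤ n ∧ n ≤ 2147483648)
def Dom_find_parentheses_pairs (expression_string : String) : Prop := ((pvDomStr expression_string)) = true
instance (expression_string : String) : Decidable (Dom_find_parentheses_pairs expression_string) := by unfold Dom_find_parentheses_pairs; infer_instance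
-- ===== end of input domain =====

-- B replaces A's single interleaved counter scan by a depth-table pass followed by two filter passes (objective: alternative).

-- ===== PORT A =====
-- A's for-loop over enumerate(...) with its three accumulators (opening list, closing list, counter),
-- branches in the same order; lists are appended at the back exactly as in Python.
def pvLoopA : List Char → Int → List Int × List Int × Int → List Int × List Int × Int
  | [], _, st => st
  | c :: cs, i, (op, cl, d) =>
      let d1 := if c = '(' then d + 1 else d
      let op1 := if c = '(' ∧ d1 = 1 then op ++ [i] else op
      let d2 := if c = ')' then d1 - 1 else d1
      let cl1 := if c = ')' ∧ d2 = 0 then cl ++ [i] else cl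
      pvLoopA cs (i + 1) (op1, cl1, d2)

def find_parentheses_pairs (expression_string : String) : List Int × List Int :=
  let r := pvLoopA expression_string.toList 0 ([], [], 0)
  (r.1, r.2.1)

-- ===== PORT B =====
-- the depth-table pass: post-update depth for every character
def pvDepths : Int → List Char → List Int
  | _, [] => []
  | d, c :: cs =>
      let d' := if c = '(' then d + 1 else if c = ')' then d - 1 else d
      d' :: pvDepths d' cs

-- the two comprehensions over enumerate(zip(s, depths))
def pvFilterOpen : List (Char × Int) → Int → List Int
  | [], _ => []
  | (c, dep) :: rest, i =>
      if c = '(' ∧ dep = 1 then i :: pvFilterOpen rest (i + 1) else pvFilterOpen rest (i + 1)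

def pvFilterClose : List (Char × Int) → Int → List Int
  | [], _ => []
  | (c, dep) :: rest, i =>
      if c = ')' ∧ dep = 0 then i :: pvFilterClose rest (i + 1) else pvFilterClose rest (i + 1)

def find_parentheses_pairs_alt (expression_string : String) : List Int × List Int :=
  let ds := pvDepths 0 expression_string.toList
  (pvFilterOpen (expression_string.toList.zip ds) 0,
   pvFilterClose (expression_string.toList.zip ds) 0)

-- ===== PRECONDITION & SPEC =====
def Spec_find_parentheses_pairs (expression_string : String) (out : List Int × List Int) : Prop := out = find_parentheses_pairs_alt expression_string
instance (expression_string : String) (out : List Int × List Int) : Decidable (Spec_find_parentheses_pairs expression_string out) := by unfold Spec_find_parentheses_pairs; infer_instance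

-- ===== CLAIM (what is proved, stated in full; the proofs are below) =====
def Claim_equal_find_parentheses_pairs : Prop := ∀ (expression_string : String), Dom_find_parentheses_pairs expression_string → Spec_find_parentheses_pairs expression_string (find_parentheses_pairs expression_string)

-- ===== LEMMAS AND PROOFS =====
-- running balance after the whole list (A's final counter)
def pvBal : Int → List Char → Int
  | d, [] => d
  | d, c :: cs => pvBal (if c = '(' then d + 1 else if c = ')' then d - 1 else d) cs

theorem pvLoopA_eq : ∀ (cs : List Char) (i d : Int) (op cl : List Int),
    pvLoopA cs i (op, cl, d) =
      (op ++ pvFilterOpen (cs.zip (pvDepths d cs)) i,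
       cl ++ pvFilterClose (cs.zip (pvDepths d cs)) i,
       pvBal d cs) := by
  intro cs
  induction cs with
  | nil => intro i d op cl; simp [pvLoopA, pvDepths, pvFilterOpen, pvFilterClose, pvBal]
  | cons c cs ih =>
    intro i d op cl
    by_cases ho : c = '('
    · subst ho
      simp only [pvLoopA, pvDepths, pvBal]
      rw [ih]
      by_cases h1 : d + 1 = 1 <;>
        simp [pvFilterOpen, pvFilterClose, h1, List.append_assoc]
    · by_cases hc : c = ')'
      · subst hc
        simp only [pvLoopA, pvDepths, pvBal]
        rw [ih]
        by_cases h0 : d - 1 = 0 <;>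
          simp [pvFilterOpen, pvFilterClose, h0, List.append_assoc]
      · simp only [pvLoopA, pvDepths, pvBal, if_neg ho, if_neg hc]
        rw [ih]
        simp [pvFilterOpen, pvFilterClose, ho, hc]

-- ===== VERDICT (by name: the statement is the Claim_ definition above) =====
theorem find_parentheses_pairs_spec : Claim_equal_find_parentheses_pairs := by
  intro s _
  unfold Spec_find_parentheses_pairs find_parentheses_pairs find_parentheses_pairs_alt
  rw [pvLoopA_eq]
  simp
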